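-- pv_equiv track=rewrite | github.com/Ace1928/eidosian_forge | scripts/ci/changed_manifest.py | _python_component_payload
-- ===== SOURCE A (Python) =====
-- PYTHON_COMPONENTS = [
--     {"component": "agent_forge", "root": "agent_forge", "test_path": "agent_forge/tests"},
--     {"component": "benchmarks", "root": "benchmarks", "test_path": "benchmarks/tests"},
--     {"component": "code_forge", "root": "code_forge", "test_path": "code_forge/tests"},
--     {"component": "crawl_forge", "root": "crawl_forge", "test_path": "crawl_forge/tests"},
--     {"component": "doc_forge", "root": "doc_forge", "test_path": "doc_forge/src/doc_forge/scribe/tests"},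
--     {"component": "eidos_mcp", "root": "eidos_mcp", "test_path": "eidos_mcp/tests"},
--     {"component": "knowledge_forge", "root": "knowledge_forge", "test_path": "knowledge_forge/tests"},
--     {"component": "lib", "root": "lib", "test_path": "lib/tests"},
--     {"component": "llm_forge", "root": "llm_forge", "test_path": "llm_forge/tests"},
--     {"component": "memory_forge", "root": "memory_forge", "test_path": "memory_forge/tests"},
--     {"component": "scripts", "root": "scripts", "test_path": "scripts/tests"},
--     {"component": "tests", "root": "tests", "test_path": "tests"},
--     {"component": "web_interface_forge", "root": "web_interface_forge", "test_path": "web_interface_forge/tests"},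
--     {"component": "word_forge", "root": "word_forge", "test_path": "word_forge/tests"},
-- ]
--
-- PYTHON_GLOBAL_PREFIXES = {
--     "lib",
-- }
--
-- PYTHON_TRIGGER_FILES = {
--     "mypy.ini",
--     "pyproject.toml",
--     "pytest.ini",
--     "ruff.toml",
--     "setup.cfg",
--     "setup.py",
-- }
--
-- IGNORED_PREFIXES = (
--     ".git/",
--     "data/bench_workspaces/",
--     "data/runtime/",
--     "docs/external_references/",
--     "eidosian_venv/",
--     "node_modules/",
--     "reports/",
-- )
--
-- def _is_ignored(path: str) -> bool:
--     return any(path.startswith(prefix) for prefix in IGNORED_PREFIXES)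
--
-- def _python_component_payload(force_all: bool, changed_files: list[str]) -> dict[str, list[dict[str, str]]]:
--     if force_all or not changed_files:
--         return {"include": PYTHON_COMPONENTS}
--
--     known_components = {entry["component"] for entry in PYTHON_COMPONENTS}
--     touched: set[str] = set()
--     include_all = False
--
--     for rel in changed_files:
--         if _is_ignored(rel):
--             continue
--         first = rel.split("/", 1)[0]
--         if first in PYTHON_GLOBAL_PREFIXES or rel in PYTHON_TRIGGER_FILES:
--             include_all = True
--             break
--         if "/" not in rel:
--             if not rel.endswith(".md"):
--                 include_all = True
--                 break
--             continue
--         if first in known_components: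
--             touched.add(first)
--         elif rel.startswith("doc_forge/src/doc_forge/scribe/"):
--             touched.add("doc_forge")
--         elif rel.startswith("game_forge/src/autoseed/"):
--             # Keep TS-only project out of Python matrix.
--             continue
--
--     if include_all:
--         return {"include": PYTHON_COMPONENTS}
--
--     selected = [entry for entry in PYTHON_COMPONENTS if entry["component"] in touched]
--     return {"include": selected}
-- ===== SOURCE B (Python) =====
-- # B rebuilds the component table from the component-name list via _entry() and
-- # splits the per-path decision into two small predicates (_forces_all /
-- # _component_of) driving staged passes (any(), then a set comprehension),
-- # instead of A's literal table and single break-loop with inline branches.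
--
-- _NAMES = [
--     "agent_forge", "benchmarks", "code_forge", "crawl_forge", "doc_forge",
--     "eidos_mcp", "knowledge_forge", "lib", "llm_forge", "memory_forge",
--     "scripts", "tests", "web_interface_forge", "word_forge",
-- ]
--
-- _GLOBAL_PREFIXES = {"lib"}
--
-- _TRIGGER_FILES = {"mypy.ini", "pyproject.toml", "pytest.ini", "ruff.toml", "setup.cfg", "setup.py"}
--
-- _IGNORED = (
--     ".git/",
--     "data/bench_workspaces/",
--     "data/runtime/",
--     "docs/external_references/",
--     "eidosian_venv/",
--     "node_modules/",
--     "reports/",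
-- )
--
-- _KNOWN = set(_NAMES)
--
--
-- def _entry(name):
--     """Rebuild one PYTHON_COMPONENTS row from its component name."""
--     if name == "doc_forge":
--         test_path = "doc_forge/src/doc_forge/scribe/tests"
--     elif name == "tests":
--         test_path = "tests"
--     else:
--         test_path = name + "/tests"
--     return {"component": name, "root": name, "test_path": test_path}
--
--
-- def _is_ignored(path):
--     return path.startswith(_IGNORED)
--
--
-- def _forces_all(rel):
--     """Does this one changed path force the full matrix?"""
--     if _is_ignored(rel):
--         return False
--     if rel.split("/", 1)[0] in _GLOBAL_PREFIXES or rel in _TRIGGER_FILES: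
--         return True
--     return "/" not in rel and not rel.endswith(".md")
--
--
-- def _component_of(rel):
--     """The component a changed path touches, or None."""
--     if _is_ignored(rel):
--         return None
--     first = rel.split("/", 1)[0]
--     if "/" in rel and first in _KNOWN:
--         return first
--     return None
--
--
-- def _python_component_payload(force_all, changed_files):
--     if force_all or not changed_files:
--         return {"include": [_entry(n) for n in _NAMES]}
--     if any(_forces_all(rel) for rel in changed_files):
--         return {"include": [_entry(n) for n in _NAMES]}
--     touched = {c for c in map(_component_of, changed_files) if c is not None}
--     return {"include": [_entry(n) for n in _NAMES if n in touched]}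
-- ===== Notes on version B (the rewrite author's own statement) =====
-- stated objective: alternative
-- what changed: A's literal component table and single break-loop with in-place set mutation and dead doc_forge/game_forge special-case branches are replaced by a table rebuilt from the component-name list via _entry(), two small per-path predicates (_forces_all / _component_of) and staged passes: any() for the force-all check, a set comprehension for touched components, and a name-filtered rebuild for the selection.
import Mathlib
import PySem

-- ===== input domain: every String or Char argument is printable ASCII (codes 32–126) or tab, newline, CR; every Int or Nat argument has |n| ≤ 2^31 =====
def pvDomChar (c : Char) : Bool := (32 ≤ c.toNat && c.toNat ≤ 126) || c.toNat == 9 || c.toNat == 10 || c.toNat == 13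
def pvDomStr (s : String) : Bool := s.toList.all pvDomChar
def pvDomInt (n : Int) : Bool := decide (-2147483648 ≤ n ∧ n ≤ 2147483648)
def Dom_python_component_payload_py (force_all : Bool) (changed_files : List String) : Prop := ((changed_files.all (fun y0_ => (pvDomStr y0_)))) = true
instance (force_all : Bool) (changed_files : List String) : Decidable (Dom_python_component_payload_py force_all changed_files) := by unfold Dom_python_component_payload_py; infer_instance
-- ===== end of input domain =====

-- B rebuilds the component table from the component-name list (_entry) and splits the per-path
-- decision into two predicates (_forces_all / _component_of) driving staged passes, instead of
-- A's literal table and single break-loop; objective: alternative (same cost, different shape).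

-- ===== PORT A =====
-- PYTHON_COMPONENTS (A keeps the table as a literal)
def pyComponents : List (List (String × String)) :=
  [ [("component", "agent_forge"), ("root", "agent_forge"), ("test_path", "agent_forge/tests")],
    [("component", "benchmarks"), ("root", "benchmarks"), ("test_path", "benchmarks/tests")],
    [("component", "code_forge"), ("root", "code_forge"), ("test_path", "code_forge/tests")],
    [("component", "crawl_forge"), ("root", "crawl_forge"), ("test_path", "crawl_forge/tests")],
    [("component", "doc_forge"), ("root", "doc_forge"), ("test_path", "doc_forge/src/doc_forge/scribe/tests")],
    [("component", "eidos_mcp"), ("root", "eidos_mcp"), ("test_path", "eidos_mcp/tests")],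
    [("component", "knowledge_forge"), ("root", "knowledge_forge"), ("test_path", "knowledge_forge/tests")],
    [("component", "lib"), ("root", "lib"), ("test_path", "lib/tests")],
    [("component", "llm_forge"), ("root", "llm_forge"), ("test_path", "llm_forge/tests")],
    [("component", "memory_forge"), ("root", "memory_forge"), ("test_path", "memory_forge/tests")],
    [("component", "scripts"), ("root", "scripts"), ("test_path", "scripts/tests")],
    [("component", "tests"), ("root", "tests"), ("test_path", "tests")],
    [("component", "web_interface_forge"), ("root", "web_interface_forge"), ("test_path", "web_interface_forge/tests")],
    [("component", "word_forge"), ("root", "word_forge"), ("test_path", "word_forge/tests")] ]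

def pyGlobalPrefixes : PySem.Set String := PySem.Set.ofList ["lib"]

def pyTriggerFiles : PySem.Set String :=
  PySem.Set.ofList ["mypy.ini", "pyproject.toml", "pytest.ini", "ruff.toml", "setup.cfg", "setup.py"]

def ignoredPrefixes : List String :=
  [".git/", "data/bench_workspaces/", "data/runtime/", "docs/external_references/",
   "eidosian_venv/", "node_modules/", "reports/"]

-- _is_ignored
def isIgnored (path : String) : Bool :=
  ignoredPrefixes.any (fun pre => PySem.Str.startswith path pre)

-- entry["component"]; KeyError is unreachable: every entry of pyComponents carries "component"
def componentOf (e : List (String × String)) : String :=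
  PySem.Dict.getD (PySem.Dict.mk e) "component" ""

-- {entry["component"] for entry in PYTHON_COMPONENTS}
def knownComponents : PySem.Set String := PySem.Set.ofList (pyComponents.map componentOf)

-- rel.split("/", 1)[0]; split with a nonempty separator never fails and never returns []
def firstSeg (rel : String) : String := (((PySem.Str.splitMax? rel "/" 1).getD []).headD "")

-- A's for-loop with its break: returns (touched, include_all)
def loopA : List String → PySem.Set String → PySem.Set String × Bool
  | [], touched => (touched, false)
  | rel :: rest, touched =>
    if isIgnored rel then loopA rest touched
    else if PySem.Set.contains pyGlobalPrefixes (firstSeg rel) || PySem.Set.contains pyTriggerFiles rel then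
      (touched, true)
    else if !(PySem.Str.isIn "/" rel) then
      (if !(PySem.Str.endswith rel ".md") then (touched, true) else loopA rest touched)
    else if PySem.Set.contains knownComponents (firstSeg rel) then
      loopA rest (PySem.Set.add touched (firstSeg rel))
    else if PySem.Str.startswith rel "doc_forge/src/doc_forge/scribe/" then
      loopA rest (PySem.Set.add touched "doc_forge")
    else if PySem.Str.startswith rel "game_forge/src/autoseed/" then
      loopA rest touched
    else loopA rest touched

def python_component_payload_py (force_all : Bool) (changed_files : List String) : List (String × List (List (String × String))) :=
  if force_all || changed_files.isEmpty then [("include", pyComponents)]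
  else
    let r := loopA changed_files PySem.Set.empty
    if r.2 then [("include", pyComponents)]
    else [("include", pyComponents.filter (fun e => PySem.Set.contains r.1 (componentOf e)))]

-- ===== PORT B =====
-- _NAMES
def bNames : List String :=
  ["agent_forge", "benchmarks", "code_forge", "crawl_forge", "doc_forge",
   "eidos_mcp", "knowledge_forge", "lib", "llm_forge", "memory_forge",
   "scripts", "tests", "web_interface_forge", "word_forge"]

def bGlobals : PySem.Set String := PySem.Set.ofList ["lib"]

def bTriggers : PySem.Set String :=
  PySem.Set.ofList ["mypy.ini", "pyproject.toml", "pytest.ini", "ruff.toml", "setup.cfg", "setup.py"]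

def bIgnoredTuple : List String :=
  [".git/", "data/bench_workspaces/", "data/runtime/", "docs/external_references/",
   "eidosian_venv/", "node_modules/", "reports/"]

-- _KNOWN = set(_NAMES)
def bKnown : PySem.Set String := PySem.Set.ofList bNames

-- _entry(name); 'name + "/tests"' is string concatenation, ported exactly over List Char
def bEntry (name : String) : List (String × String) :=
  let test_path :=
    if name = "doc_forge" then "doc_forge/src/doc_forge/scribe/tests"
    else if name = "tests" then "tests"
    else String.mk (name.toList ++ "/tests".toList)
  [("component", name), ("root", name), ("test_path", test_path)]

-- _is_ignored; path.startswith(tuple) is 'any prefix matches', exact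
def bIsIgnored (path : String) : Bool :=
  bIgnoredTuple.any (fun pre => PySem.Str.startswith path pre)

-- _forces_all(rel)
def bForcesAll (rel : String) : Bool :=
  if bIsIgnored rel then false
  else if PySem.Set.contains bGlobals (firstSeg rel) || PySem.Set.contains bTriggers rel then true
  else !(PySem.Str.isIn "/" rel) && !(PySem.Str.endswith rel ".md")

-- _component_of(rel)
def bComponentOf (rel : String) : Option String :=
  if bIsIgnored rel then none
  else if PySem.Str.isIn "/" rel && PySem.Set.contains bKnown (firstSeg rel) then some (firstSeg rel)
  else none

def python_component_payload_py_alt (force_all : Bool) (changed_files : List String) : List (String × List (List (String × String))) :=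
  if force_all || changed_files.isEmpty then [("include", bNames.map bEntry)]
  else if changed_files.any bForcesAll then [("include", bNames.map bEntry)]
  else
    -- {c for c in map(_component_of, changed_files) if c is not None}
    let touched := PySem.Set.ofList (changed_files.filterMap bComponentOf)
    [("include", (bNames.filter (fun n => PySem.Set.contains touched n)).map bEntry)]

-- ===== PRECONDITION & SPEC =====
def Spec_python_component_payload_py (force_all : Bool) (changed_files : List String) (out : List (String × List (List (String × String)))) : Prop := out = python_component_payload_py_alt force_all changed_files
instance (force_all : Bool) (changed_files : List String) (out : List (String × List (List (String × String)))) : Decidable (Spec_python_component_payload_py force_all changed_files out) := by unfold Spec_python_component_payload_py; infer_instance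

-- ===== CLAIM (what is proved, stated in full; the proofs are below) =====
def Claim_equal_python_component_payload_py : Prop := ∀ (force_all : Bool) (changed_files : List String), Dom_python_component_payload_py force_all changed_files → Spec_python_component_payload_py force_all changed_files (python_component_payload_py force_all changed_files)

-- ===== LEMMAS AND PROOFS =====

-- A's literal table is B's rebuilt one
lemma pyComponents_eq : pyComponents = bNames.map bEntry := by decide

-- the "component" field of a rebuilt entry is its name
lemma componentOf_bEntry (n : String) : componentOf (bEntry n) = n := rfl

-- B's constants coincide with A's
lemma ignored_eq (s : String) : bIsIgnored s = isIgnored s := rfl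
lemma known_eq : bKnown = knownComponents := by decide

-- splitOnMax.go consumes one non-separator character
lemma go_step (c : Char) (hc : c ≠ '/') (fuel m : Nat) (hm : m ≠ 0) (l cur : List Char) (acc : List (List Char)) :
    PySem.Chars.splitOnMax.go ['/'] (fuel + 1) m (c :: l) cur acc
      = PySem.Chars.splitOnMax.go ['/'] fuel m l (c :: cur) acc := by
  rw [PySem.Chars.splitOnMax.go]
  simp [hm, List.isPrefixOf]
  intro h; exact absurd h.symm hc

-- splitOnMax.go at a separator
lemma go_slash (fuel m : Nat) (hm : m ≠ 0) (l cur : List Char) (acc : List (List Char)) :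
    PySem.Chars.splitOnMax.go ['/'] (fuel + 1) m ('/' :: l) cur acc
      = PySem.Chars.splitOnMax.go ['/'] fuel (m - 1) l [] (cur.reverse :: acc) := by
  rw [PySem.Chars.splitOnMax.go]
  simp [hm, List.isPrefixOf]

-- splitOnMax.go with the split budget used up
lemma go_m0 (fuel : Nat) (l : List Char) (acc : List (List Char)) :
    PySem.Chars.splitOnMax.go ['/'] fuel 0 l [] acc = (l :: acc).reverse := by
  cases fuel with
  | zero => rw [PySem.Chars.splitOnMax.go]; simp
  | succ f =>
    cases l with
    | nil => rw [PySem.Chars.splitOnMax.go]; simp; omega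
    | cons c r => rw [PySem.Chars.splitOnMax.go]; simp

lemma go_prefix (p : List Char) (hp : '/' ∉ p) :
    ∀ (fuel : Nat) (t cur : List Char) (acc : List (List Char)),
    PySem.Chars.splitOnMax.go ['/'] (fuel + p.length) 1 (p ++ '/' :: t) cur acc
      = PySem.Chars.splitOnMax.go ['/'] fuel 1 ('/' :: t) (p.reverse ++ cur) acc := by
  induction p with
  | nil => intro fuel t cur acc; simp
  | cons c q ih =>
    intro fuel t cur acc
    have hc : c ≠ '/' := by intro h; exact hp (by simp [h])
    have hq : '/' ∉ q := fun h => hp (by simp [h])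
    have : fuel + (q.length + 1) = (fuel + q.length) + 1 := by omega
    simp only [List.length_cons, this, List.cons_append]
    rw [go_step c hc _ 1 (by omega), ih hq fuel t (c :: cur) acc]
    simp

lemma splitOnMax_prefix (p t : List Char) (hp : '/' ∉ p) :
    PySem.Chars.splitOnMax (p ++ '/' :: t) ['/'] 1 = [p, t] := by
  rw [PySem.Chars.splitOnMax]
  norm_num
  have hlen : p.length + (t.length + 1) + 1 = (t.length + 2) + p.length := by omega
  simp only [hlen]
  rw [go_prefix p hp (t.length + 2) t [] []]
  rw [show t.length + 2 = (t.length + 1) + 1 from rfl, go_slash _ 1 (by omega)]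
  simp [go_m0]

-- a path under doc_forge/src/doc_forge/scribe/ has first segment "doc_forge"
lemma firstSeg_docforge (rel : String)
    (h : PySem.Str.startswith rel "doc_forge/src/doc_forge/scribe/" = true) :
    firstSeg rel = "doc_forge" := by
  have hpre : "doc_forge/src/doc_forge/scribe/".toList <+: rel.toList := by
    have := PySem.Chars.startswith_iff rel.toList "doc_forge/src/doc_forge/scribe/".toList
    simp at h
    exact this.mp h
  obtain ⟨t, ht⟩ := hpre
  have ht' : rel.toList = "doc_forge".toList ++ '/' :: ("src/doc_forge/scribe/".toList ++ t) := by
    rw [← ht]; rfl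
  rw [firstSeg, PySem.Str.splitMax?, PySem.Chars.splitMax?]
  simp only [ht', show ("/".toList) = ['/'] from rfl, List.isEmpty]
  rw [splitOnMax_prefix _ _ (by decide)]
  rfl

-- B's set constants are A's
lemma bGlobals_eq : bGlobals = pyGlobalPrefixes := rfl
lemma bTriggers_eq : bTriggers = pyTriggerFiles := rfl

-- one step of A's loop, described by B's two predicates
lemma loopA_step (rel : String) (rest : List String) (touched : PySem.Set String) :
    loopA (rel :: rest) touched =
      if bForcesAll rel then (touched, true)
      else loopA rest ((bComponentOf rel).elim touched touched.add) := by
  by_cases h1 : isIgnored rel = true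
  · have hbf : bForcesAll rel = false := by simp [bForcesAll, ignored_eq, h1]
    have hbc : bComponentOf rel = none := by simp [bComponentOf, ignored_eq, h1]
    simp only [loopA, if_pos h1, hbf, hbc]
    simp
  · have h1' : isIgnored rel = false := by simpa using h1
    simp only [loopA, if_neg h1]
    by_cases h2 : (PySem.Set.contains pyGlobalPrefixes (firstSeg rel) || PySem.Set.contains pyTriggerFiles rel) = true
    · have h2p : firstSeg rel ∈ pyGlobalPrefixes ∨ rel ∈ pyTriggerFiles := by simpa using h2
      have hbf : bForcesAll rel = true := by
        simp [bForcesAll, ignored_eq, bGlobals_eq, bTriggers_eq, h1']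
        exact Or.inl h2p
      rw [if_pos h2, hbf]
      simp
    · have h2' : (PySem.Set.contains pyGlobalPrefixes (firstSeg rel) || PySem.Set.contains pyTriggerFiles rel) = false := by
        simpa using h2
      have h2n : firstSeg rel ∉ pyGlobalPrefixes ∧ rel ∉ pyTriggerFiles := by simpa using h2'
      rw [if_neg h2]
      by_cases h3 : (!(PySem.Str.isIn "/" rel)) = true
      · have h3c : PySem.Chars.isIn ['/'] rel.toList = false := by simpa using h3
        have hbc : bComponentOf rel = none := by
          simp [bComponentOf, ignored_eq, h1']
          intro hcontra
          rw [hcontra] at h3c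
          simp at h3c
        rw [if_pos h3]
        by_cases h4 : PySem.Str.endswith rel ".md" = true
        · have h4' : ¬ ((!(PySem.Str.endswith rel ".md")) = true) := by simpa using h4
          have h4c : PySem.Chars.endswith rel.toList ['.', 'm', 'd'] = true := by simpa using h4
          have hbf : bForcesAll rel = false := by
            simp [bForcesAll, ignored_eq, bGlobals_eq, bTriggers_eq, h1']
            exact ⟨h2n, fun _ => h4c⟩
          rw [if_neg h4', hbf, hbc]
          simp
        · have h4' : (!(PySem.Str.endswith rel ".md")) = true := by simpa using h4
          have h4c : PySem.Chars.endswith rel.toList ['.', 'm', 'd'] = false := by simpa using h4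
          have hbf : bForcesAll rel = true := by
            simp [bForcesAll, ignored_eq, bGlobals_eq, bTriggers_eq, h1']
            exact Or.inr ⟨h3c, h4c⟩
          rw [if_pos h4', hbf]
          simp
      · have h3' : PySem.Str.isIn "/" rel = true := by simpa using h3
        have h3t : PySem.Chars.isIn ['/'] rel.toList = true := by simpa using h3'
        have hbf : bForcesAll rel = false := by
          simp [bForcesAll, ignored_eq, bGlobals_eq, bTriggers_eq, h1']
          exact ⟨h2n, fun h => absurd (h3t.symm.trans h) (by decide)⟩
        rw [if_neg h3]
        by_cases h5 : PySem.Set.contains knownComponents (firstSeg rel) = true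
        · have h5m : firstSeg rel ∈ knownComponents := by simpa using h5
          have hbc : bComponentOf rel = some (firstSeg rel) := by
            simp [bComponentOf, ignored_eq, known_eq, h1']
            exact ⟨h3t, h5m⟩
          rw [if_pos h5, hbf, hbc]
          simp
        · have hbc : bComponentOf rel = none := by
            simp [bComponentOf, ignored_eq, known_eq, h1']
            exact fun _ => by simpa using h5
          rw [if_neg h5]
          by_cases h6 : PySem.Str.startswith rel "doc_forge/src/doc_forge/scribe/" = true
          · -- unreachable: such a path's first segment is "doc_forge", a known component
            exfalso
            apply h5
            rw [firstSeg_docforge rel h6]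
            decide
          · rw [if_neg h6]
            by_cases h7 : PySem.Str.startswith rel "game_forge/src/autoseed/" = true
            · rw [if_pos h7, hbf, hbc]
              simp
            · rw [if_neg h7, hbf, hbc]
              simp

-- A's break flag is B's "some path forces all"
lemma loopA_snd (rels : List String) : ∀ touched : PySem.Set String,
    (loopA rels touched).2 = rels.any bForcesAll := by
  induction rels with
  | nil => intro touched; simp [loopA]
  | cons rel rest ih =>
    intro touched
    rw [loopA_step, List.any_cons]
    by_cases hf : bForcesAll rel = true
    · simp [hf]
    · simp only [Bool.not_eq_true] at hf
      simp [hf, ih]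

-- A's touched set holds, as a set, exactly B's component tags
lemma loopA_fst (rels : List String) : ∀ touched : PySem.Set String,
    rels.any bForcesAll = false →
    ∀ c : String,
      (c ∈ (loopA rels touched).1 ↔ c ∈ touched ∨ c ∈ rels.filterMap bComponentOf) := by
  induction rels with
  | nil => intro touched _ c; simp [loopA]
  | cons rel rest ih =>
    intro touched hall c
    rw [List.any_cons] at hall
    simp only [Bool.or_eq_false_iff] at hall
    obtain ⟨hf, hrest⟩ := hall
    rw [loopA_step, if_neg (by simp [hf])]
    cases hco : bComponentOf rel with
    | none =>
      simp only [Option.elim]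
      rw [ih touched hrest c]
      simp [hco]
    | some x =>
      simp only [Option.elim]
      rw [ih (touched.add x) hrest c]
      simp only [List.filterMap_cons, hco, List.mem_cons, PySem.Set.mem_add]
      tauto

-- ===== VERDICT (by name: the statement is the Claim_ definition above) =====
theorem python_component_payload_py_spec : Claim_equal_python_component_payload_py := by
  intro fa cf _
  unfold Spec_python_component_payload_py
  unfold python_component_payload_py python_component_payload_py_alt
  by_cases h0 : (fa || cf.isEmpty) = true
  · simp [h0, pyComponents_eq]
  · simp only [h0, Bool.false_eq_true, if_false]
    by_cases hall : cf.any bForcesAll = true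
    · simp only [loopA_snd, hall]
      simp [pyComponents_eq]
    · simp only [Bool.not_eq_true] at hall
      simp only [loopA_snd, hall, Bool.false_eq_true, if_false]
      rw [pyComponents_eq, List.filter_map]
      refine congrArg (fun l => [("include", List.map bEntry l)]) (List.filter_congr ?_)
      intro n _
      simp only [Function.comp_apply, componentOf_bEntry]
      simp only [PySem.Set.contains_eq_decide]
      congr 1
      apply propext
      rw [loopA_fst cf PySem.Set.empty hall n, PySem.Set.mem_ofList]
      simp [PySem.Set.empty]
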